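-- pv_equiv track=rewrite | github.com/YohansHailu/competitive_programming | daynamic_programing/Maximal_Rectangle.py | make_right_one_memo
-- ===== SOURCE A (Python) =====
-- def make_right_one_memo(matrix):
--     # here is the dp
--     memo = dict()
--     count = 0
--     for i in range(len(matrix)):
--         for j in range(len(matrix[i])-1,-1,-1):
--             if matrix[i][j] != "1":
--                 count = 0
--                 continue
--             count += 1
--             memo[(i,j)] = count
--         count = 0
--     return memo
-- ===== SOURCE B (Python) =====
-- def make_right_one_memo(matrix):
--     # Run-based: find maximal runs of "1" per row left-to-right, then emit
--     # closed-form values end - j + 1, rightmost run first, j descending.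
--     memo = {}
--     for i, row in enumerate(matrix):
--         runs = []
--         for j, cell in enumerate(row):
--             if cell == "1":
--                 if runs and runs[-1][1] == j - 1:
--                     runs[-1] = (runs[-1][0], j)
--                 else:
--                     runs.append((j, j))
--         for s, e in reversed(runs):
--             for j in range(e, s - 1, -1):
--                 memo[(i, j)] = e - j + 1
--     return memo
-- ===== Notes on version B (the rewrite author's own statement) =====
-- stated objective: alternative
-- what changed: A sweeps each row right-to-left with a running counter; B scans left-to-right collecting maximal runs of '1' cells and then emits each cell's value by the closed form end - j + 1 per run (rightmost run first).
import Mathlib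
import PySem

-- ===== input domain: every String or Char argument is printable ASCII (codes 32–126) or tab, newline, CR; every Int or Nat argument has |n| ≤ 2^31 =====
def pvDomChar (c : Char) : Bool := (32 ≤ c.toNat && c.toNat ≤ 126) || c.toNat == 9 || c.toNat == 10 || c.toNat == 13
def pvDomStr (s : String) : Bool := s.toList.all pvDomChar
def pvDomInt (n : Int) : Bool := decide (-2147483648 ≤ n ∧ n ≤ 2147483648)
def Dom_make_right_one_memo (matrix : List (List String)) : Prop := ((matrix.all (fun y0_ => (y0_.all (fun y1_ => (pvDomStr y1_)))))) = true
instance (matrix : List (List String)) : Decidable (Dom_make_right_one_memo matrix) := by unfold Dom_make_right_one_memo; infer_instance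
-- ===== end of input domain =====

-- B replaces A's right-to-left running counter with a left-to-right maximal-run
-- scan plus closed-form per-run emission (alternative decomposition, same cost).

-- ===== PORT A =====
-- inner loop of A: for j in range(len(row)-1,-1,-1): …  on state (memo, count)
def aInner (i : Int) (row : List String) (st : PySem.Dict (Int × Int) Int × Int) :
    PySem.Dict (Int × Int) Int × Int :=
  (PySem.List.pyRange ((row.length : Int) - 1) (-1) (-1)).foldl
    (fun st j =>
      if PySem.List.pyGetD row j "" ≠ "1" then (st.1, 0)
      else (st.1.insert (i, j) (st.2 + 1), st.2 + 1)) st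

def make_right_one_memo (matrix : List (List String)) : List (Int × Int × Int) :=
  let st := (PySem.List.pyRange 0 (matrix.length : Int) 1).foldl
    (fun (st : PySem.Dict (Int × Int) Int × Int) i =>
      ((aInner i (PySem.List.pyGetD matrix i []) st).1, 0))
    (PySem.Dict.empty, 0)
  st.1.items.map (fun p => (p.1.1, p.1.2, p.2))

-- ===== PORT B =====
-- one enumerate step of B's run collector: extend the last run or open a new one
def bRunsStep (runs : List (Int × Int)) (pc : Int × String) : List (Int × Int) :=
  if pc.2 = "1" then
    match runs.getLast? with
    | some se => if se.2 = pc.1 - 1 then runs.dropLast ++ [(se.1, pc.1)] else runs ++ [(pc.1, pc.1)]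
    | none => runs ++ [(pc.1, pc.1)]
  else runs

-- runs of maximal consecutive "1" cells, left to right (B's first inner loop)
def bRuns (row : List String) : List (Int × Int) :=
  (PySem.List.enumerate row).foldl bRunsStep []

-- emission of one run: for j in range(e, s-1, -1): memo[(i,j)] = e - j + 1
def bEmitRun (i : Int) (memo : PySem.Dict (Int × Int) Int) (se : Int × Int) :
    PySem.Dict (Int × Int) Int :=
  (PySem.List.pyRange se.2 (se.1 - 1) (-1)).foldl
    (fun memo j => memo.insert (i, j) (se.2 - j + 1)) memo

-- body of B's row loop
def bRow (memo : PySem.Dict (Int × Int) Int) (pr : Int × List String) :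
    PySem.Dict (Int × Int) Int :=
  (bRuns pr.2).reverse.foldl (bEmitRun pr.1) memo

def make_right_one_memo_alt (matrix : List (List String)) : List (Int × Int × Int) :=
  let memo := (PySem.List.enumerate matrix).foldl bRow PySem.Dict.empty
  memo.items.map (fun p => (p.1.1, p.1.2, p.2))

-- ===== PRECONDITION & SPEC =====
def Spec_make_right_one_memo (matrix : List (List String)) (out : List (Int × Int × Int)) : Prop := out = make_right_one_memo_alt matrix
instance (matrix : List (List String)) (out : List (Int × Int × Int)) : Decidable (Spec_make_right_one_memo matrix out) := by unfold Spec_make_right_one_memo; infer_instance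

-- ===== CLAIM (what is proved, stated in full; the proofs are below) =====
def Claim_equal_make_right_one_memo : Prop := ∀ (matrix : List (List String)), Dom_make_right_one_memo matrix → Spec_make_right_one_memo matrix (make_right_one_memo matrix)

-- ===== LEMMAS AND PROOFS =====

-- length of the leading run of "1"s
def lead : List String → Int
  | [] => 0
  | x :: t => if x = "1" then lead t + 1 else 0

-- A's per-row emitted entries: cells given in REVERSED row order (head = index j)
def Dr (i : Int) : Int → List String → Int → List ((Int × Int) × Int)
  | _, [], _ => []
  | j, x :: xs, c => if x = "1" then ((i, j), c + 1) :: Dr i (j - 1) xs (c + 1) else Dr i (j - 1) xs 0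

-- A's count after processing a reversed row
def Cr : List String → Int → Int
  | [], c => c
  | x :: xs, c => if x = "1" then Cr xs (c + 1) else Cr xs 0

-- specification of B's run list, by left recursion with absolute start index s
def runsSpec (s : Int) : List String → List (Int × Int)
  | [] => []
  | x :: rest =>
    if x = "1" then
      match runsSpec (s + 1) rest with
      | (s', e) :: rs => if s' = s + 1 then (s, e) :: rs else (s, s) :: (s', e) :: rs
      | [] => [(s, s)]
    else runsSpec (s + 1) rest

-- entries of one run, j descending
def runE (i : Int) (se : Int × Int) : List ((Int × Int) × Int) :=
  (PySem.List.pyRange se.2 (se.1 - 1) (-1)).map (fun j => ((i, j), se.2 - j + 1))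

-- B's per-row emitted entries: rightmost run first
def emitB (i : Int) (rs : List (Int × Int)) : List ((Int × Int) × Int) :=
  rs.reverse.flatMap (runE i)

-- the common flattened entry list of the whole matrix
def flatRows : List (List String) → Int → List ((Int × Int) × Int)
  | [], _ => []
  | r :: rs, i => Dr i ((r.length : Int) - 1) r.reverse 0 ++ flatRows rs (i + 1)

lemma Cr_append (xs : List String) (y : String) (c : Int) :
    Cr (xs ++ [y]) c = if y = "1" then Cr xs c + 1 else 0 := by
  induction xs generalizing c with
  | nil => simp [Cr]
  | cons x xs ih =>
    simp only [List.cons_append, Cr]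
    by_cases h1 : x = "1" <;> simp only [h1, if_true, if_false, reduceIte] <;> rw [ih]

lemma Cr_reverse (row : List String) : Cr row.reverse 0 = lead row := by
  induction row with
  | nil => simp [Cr, lead]
  | cons x t ih => simp [lead, Cr_append, ih]

lemma Dr_append (xs : List String) (y : String) (i j c : Int) :
    Dr i j (xs ++ [y]) c =
      Dr i j xs c ++ (if y = "1" then [((i, j - xs.length), Cr xs c + 1)] else []) := by
  induction xs generalizing j c with
  | nil => by_cases h : y = "1" <;> simp [Dr, Cr, h]
  | cons x xs ih =>
    simp only [List.cons_append, Dr, Cr, List.length_cons]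
    have hidx : j - 1 - (xs.length : Int) = j - ((xs.length + 1 : Nat) : Int) := by
      push_cast; ring
    by_cases h : x = "1" <;> simp only [h, if_true, if_false, reduceIte] <;>
      rw [ih, hidx] <;> simp

lemma Dr_mem (xs : List String) (i : Int) :
    ∀ (j c : Int) p, p ∈ Dr i j xs c → p.1.1 = i ∧ p.1.2 ≤ j := by
  induction xs with
  | nil => intro j c p hp; simp [Dr] at hp
  | cons x xs ih =>
    intro j c p hp
    by_cases h : x = "1"
    · simp only [Dr, h, if_true, reduceIte] at hp
      rcases List.mem_cons.mp hp with rfl | hp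
      · exact ⟨rfl, le_refl _⟩
      · rcases ih (j-1) (c+1) p hp with ⟨h1, h2⟩; exact ⟨h1, by omega⟩
    · simp only [Dr, h, if_false, reduceIte] at hp
      rcases ih (j-1) 0 p hp with ⟨h1, h2⟩; exact ⟨h1, by omega⟩

lemma Dr_keys_nodup (xs : List String) (i : Int) :
    ∀ (j c : Int), ((Dr i j xs c).map (·.1)).Nodup := by
  induction xs with
  | nil => intro j c; simp [Dr]
  | cons x xs ih =>
    intro j c
    by_cases h : x = "1" <;> simp only [Dr, h, if_true, if_false, reduceIte]
    · simp only [List.map_cons, List.nodup_cons]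
      refine ⟨?_, ih (j-1) (c+1)⟩
      intro hmem
      rcases List.mem_map.mp hmem with ⟨p, hp, hkey⟩
      have h2 := (Dr_mem xs i (j-1) (c+1) p hp).2
      have h3 : ((i, j) : Int × Int).2 ≤ j - 1 := by rw [← hkey]; exact h2
      have h4 : j ≤ j - 1 := h3
      omega
    · exact ih (j-1) 0

lemma Dr_nil (xs : List String) (i : Int) (h : ∀ x ∈ xs, x ≠ "1") :
    ∀ (j c : Int), Dr i j xs c = [] := by
  induction xs with
  | nil => intro j c; simp [Dr]
  | cons x xs ih =>
    intro j c
    have hx : x ≠ "1" := h x (List.mem_cons_self ..)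
    simp only [Dr, hx, if_false, reduceIte]
    exact ih (fun y hy => h y (List.mem_cons_of_mem _ hy)) (j-1) 0

lemma runsSpec_ge (row : List String) :
    ∀ (s : Int) p, p ∈ runsSpec s row → s ≤ p.1 ∧ p.1 ≤ p.2 := by
  induction row with
  | nil => intro s p hp; simp [runsSpec] at hp
  | cons x rest ih =>
    intro s p hp
    by_cases h : x = "1" <;> simp only [runsSpec, h, if_true, if_false, reduceIte] at hp
    · rcases hm : runsSpec (s+1) rest with _ | ⟨⟨s', e⟩, rs⟩ <;> rw [hm] at hp
      · simp at hp; subst hp; simp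
      · have hhead := ih (s+1) (s', e) (hm ▸ List.mem_cons_self ..)
        by_cases hs : s' = s + 1 <;> simp only [hs, if_true, if_false, reduceIte] at hp
        · rcases List.mem_cons.mp hp with rfl | hp
          · exact ⟨by omega, by simp at hhead ⊢; omega⟩
          · have := ih (s+1) p (hm ▸ List.mem_cons_of_mem _ hp); omega
        · rcases List.mem_cons.mp hp with rfl | hp
          · simp
          · have := ih (s+1) p (hm ▸ hp); omega
    · have := ih (s+1) p hp; omega

lemma runsSpec_nil_no_one (row : List String) :
    ∀ (s : Int), runsSpec s row = [] → ∀ x ∈ row, x ≠ "1" := by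
  induction row with
  | nil => intro s _ x hx; simp at hx
  | cons y rest ih =>
    intro s hnil x hx
    by_cases h : y = "1"
    · exfalso
      simp only [runsSpec, h, if_true, reduceIte] at hnil
      rcases hm : runsSpec (s+1) rest with _ | ⟨⟨s', e⟩, rs⟩ <;> rw [hm] at hnil
      · simp at hnil
      · by_cases hs : s' = s + 1 <;> simp [hs] at hnil
    · simp only [runsSpec, h, if_false, reduceIte] at hnil
      rcases List.mem_cons.mp hx with rfl | hx
      · exact h
      · exact ih (s+1) hnil x hx

lemma lead_runsSpec (row : List String) :
    ∀ (s : Int), lead row =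
      (match runsSpec s row with
       | [] => 0
       | (s', e) :: _ => if s' = s then e - s + 1 else 0) := by
  induction row with
  | nil => intro s; simp [lead, runsSpec]
  | cons x rest ih =>
    intro s
    by_cases h : x = "1" <;> simp only [lead, runsSpec, h, if_true, if_false, reduceIte]
    · rcases hm : runsSpec (s+1) rest with _ | ⟨⟨s', e⟩, rs⟩
      · have := ih (s+1); rw [hm] at this; simp at this
        simp [this]
      · have := ih (s+1); rw [hm] at this
        by_cases hs : s' = s + 1 <;> simp only [hs, if_true, if_false, reduceIte] at this ⊢
        · simp [this]; ring
        · simp [this]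
    · rcases hm : runsSpec (s+1) rest with _ | ⟨⟨s', e⟩, rs⟩
      · simp
      · have := (runsSpec_ge rest (s+1) (s', e) (hm ▸ List.mem_cons_self ..)).1
        have hne : ¬ (s' = s) := by omega
        simp [hne]

lemma pyRange_neg_split (a b : Int) (h : b ≤ a) :
    PySem.List.pyRange a (b - 1) (-1) = PySem.List.pyRange a b (-1) ++ [b] := by
  rw [PySem.List.pyRange_neg_one_eq_reverse a (b-1), PySem.List.pyRange_neg_one_eq_reverse a b]
  have : b - 1 + 1 = b := by ring
  rw [this, PySem.List.pyRange_one_cons (by omega : b < a + 1), List.reverse_cons]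

lemma runE_single (i s : Int) : runE i (s, s) = [((i, s), 1)] := by
  have h1 : PySem.List.pyRange s (s - 1) (-1) = s :: PySem.List.pyRange (s-1) (s-1) (-1) :=
    PySem.List.pyRange_neg_one_cons (by omega)
  have h2 : PySem.List.pyRange (s-1) (s-1) (-1) = [] := PySem.List.pyRange_neg_one_eq_nil (by omega)
  simp [runE, h1, h2]

lemma runE_split (i s e : Int) (h : s ≤ e) :
    runE i (s, e) = runE i (s + 1, e) ++ [((i, s), e - s + 1)] := by
  simp only [runE]
  norm_num
  rw [pyRange_neg_split e s h, List.map_append]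
  simp

lemma emitB_cons (i : Int) (r : Int × Int) (rs : List (Int × Int)) :
    emitB i (r :: rs) = emitB i rs ++ runE i r := by
  simp [emitB]

lemma emitB_eq_Dr (row : List String) :
    ∀ (s i : Int), emitB i (runsSpec s row) = Dr i (s + row.length - 1) row.reverse 0 := by
  induction row with
  | nil => intro s i; simp [runsSpec, emitB, Dr]
  | cons x rest ih =>
    intro s i
    have hDr : Dr i (s + ((x :: rest).length : Int) - 1) (x :: rest).reverse 0 =
        Dr i (s + (rest.length : Int)) rest.reverse 0 ++
          (if x = "1" then [((i, s), Cr rest.reverse 0 + 1)] else []) := by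
      have hrev : (x :: rest).reverse = rest.reverse ++ [x] := by simp
      rw [hrev, Dr_append, List.length_reverse]
      have h1 : s + ((x :: rest).length : Int) - 1 = s + (rest.length : Int) := by
        simp only [List.length_cons]; push_cast; ring
      rw [h1]
      have h2 : s + (rest.length : Int) - (rest.length : Int) = s := by ring
      rw [h2]
    by_cases h : x = "1"
    · subst h
      rw [hDr]
      simp only [runsSpec, if_true, reduceIte]
      rcases hm : runsSpec (s+1) rest with _ | ⟨⟨s', e⟩, rs⟩
      · -- rest has no "1" at all
        have hno := runsSpec_nil_no_one rest (s+1) hm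
        have hDrnil : Dr i (s + (rest.length : Int)) rest.reverse 0 = [] :=
          Dr_nil rest.reverse i (fun y hy => hno y (List.mem_reverse.mp hy)) _ _
        have hlead : lead rest = 0 := by
          have := lead_runsSpec rest (s+1); rw [hm] at this; simpa using this
        rw [hDrnil]
        simp [emitB, runE_single, Cr_reverse, hlead]
      · have hIH := ih (s+1) i
        rw [hm] at hIH
        have hIH' : emitB i ((s', e) :: rs) = Dr i (s + (rest.length : Int)) rest.reverse 0 := by
          rw [hIH]; congr 2; push_cast; ring
        by_cases hs : s' = s + 1 <;> simp only [hs, if_true, if_false, reduceIte]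
        · -- merge: first run of rest extended to start s
          subst hs
          have hse : s ≤ e := by
            have := runsSpec_ge rest (s+1) (s+1, e) (hm ▸ List.mem_cons_self ..); omega
          have hlead : lead rest = e - s := by
            have h5 := lead_runsSpec rest (s+1); rw [hm] at h5
            have h6 : lead rest = if s + 1 = s + 1 then e - (s+1) + 1 else 0 := h5
            rw [if_pos rfl] at h6; omega
          rw [emitB_cons, runE_split i s e hse]
          rw [emitB_cons] at hIH'
          rw [← List.append_assoc, hIH']
          rw [Cr_reverse, hlead]
        · -- new singleton run (s,s)
          have hlead : lead rest = 0 := by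
            have := lead_runsSpec rest (s+1); rw [hm] at this
            simpa [hs] using this
          rw [emitB_cons, hIH']
          rw [Cr_reverse, hlead]
          simp [runE_single]
    · simp only [runsSpec, h, if_false, reduceIte]
      rw [ih (s+1) i, hDr]
      simp only [h, if_false, reduceIte, List.append_nil]
      congr 1
      push_cast; ring

lemma bRunsStep_ne_nil (acc : List (Int × Int)) (q : Int × String) (h : acc ≠ []) :
    bRunsStep acc q ≠ [] := by
  unfold bRunsStep
  split_ifs
  · rcases hl : acc.getLast? with _ | se
    · simpa using h
    · simp only []
      split_ifs <;> simp
  · exact h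

lemma bRunsStep_cons (p : Int × Int) (acc : List (Int × Int)) (q : Int × String) (h : acc ≠ []) :
    bRunsStep (p :: acc) q = p :: bRunsStep acc q := by
  rcases acc with _ | ⟨a, acc⟩
  · exact absurd rfl h
  · unfold bRunsStep
    split_ifs
    · rw [List.getLast?_cons_cons]
      rcases hl : (a :: acc).getLast? with _ | se
      · simp at hl
      · simp only []
        split_ifs <;> simp
    · rfl

lemma foldl_bRunsStep_cons (l : List (Int × String)) :
    ∀ (p : Int × Int) (acc : List (Int × Int)), acc ≠ [] →
      l.foldl bRunsStep (p :: acc) = p :: l.foldl bRunsStep acc := by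
  induction l with
  | nil => intro p acc _; rfl
  | cons q l ih =>
    intro p acc h
    simp only [List.foldl_cons]
    rw [bRunsStep_cons p acc q h, ih p _ (bRunsStep_ne_nil acc q h)]

lemma bRuns_go (row : List String) :
    ∀ (s a e0 : Int), e0 ≤ s - 1 →
      (PySem.List.enumerate row s).foldl bRunsStep [(a, e0)] =
        (match runsSpec s row with
         | (s', e) :: rs => if s' = s ∧ e0 = s - 1 then (a, e) :: rs else (a, e0) :: (s', e) :: rs
         | [] => [(a, e0)]) := by
  induction row with
  | nil => intro s a e0 _; simp [PySem.List.enumerate_nil, runsSpec]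
  | cons x rest ih =>
    intro s a e0 he
    rw [PySem.List.enumerate_cons, List.foldl_cons]
    by_cases h : x = "1"
    · subst h
      have hstep : bRunsStep [(a, e0)] (s, "1") =
          if e0 = s - 1 then [(a, s)] else [(a, e0), (s, s)] := by
        unfold bRunsStep
        simp only [List.getLast?_singleton, if_true, reduceIte]
        split_ifs <;> simp_all
      rw [hstep]
      by_cases he0 : e0 = s - 1 <;> simp only [he0, if_true, if_false, reduceIte]
      · rw [ih (s+1) a s (by omega)]
        simp only [runsSpec, if_true, reduceIte]
        rcases hm : runsSpec (s+1) rest with _ | ⟨⟨s', e⟩, rs⟩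
        · simp
        · by_cases hs : s' = s + 1 <;> simp [hs]
      · rw [foldl_bRunsStep_cons _ (a, e0) [(s, s)] (by simp)]
        rw [ih (s+1) s s (by omega)]
        simp only [runsSpec, if_true, reduceIte]
        rcases hm : runsSpec (s+1) rest with _ | ⟨⟨s', e⟩, rs⟩
        · simp [he0]
        · by_cases hs : s' = s + 1 <;> simp [hs, he0]
    · have hstep : bRunsStep [(a, e0)] (s, x) = [(a, e0)] := by
        unfold bRunsStep; simp [h]
      rw [hstep, ih (s+1) a e0 (by omega)]
      simp only [runsSpec, h, if_false, reduceIte]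
      rcases hm : runsSpec (s+1) rest with _ | ⟨⟨s', e⟩, rs⟩
      · simp
      · have hge := (runsSpec_ge rest (s+1) (s', e) (hm ▸ List.mem_cons_self ..)).1
        have c1 : ¬ (s' = s + 1 ∧ e0 = s + 1 - 1) := by rintro ⟨_, h2⟩; omega
        have c1' : ¬ (s' = s + 1 ∧ e0 = s) := by rintro ⟨_, h2⟩; omega
        have c2 : ¬ (s' = s ∧ e0 = s - 1) := by rintro ⟨h1, _⟩; omega
        simp [c1, c1', c2]

lemma bRuns_eq (row : List String) :
    ∀ (s : Int), (PySem.List.enumerate row s).foldl bRunsStep [] = runsSpec s row := by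
  induction row with
  | nil => intro s; simp [PySem.List.enumerate_nil, runsSpec]
  | cons x rest ih =>
    intro s
    rw [PySem.List.enumerate_cons, List.foldl_cons]
    by_cases h : x = "1"
    · have hstep : bRunsStep [] (s, x) = [(s, s)] := by unfold bRunsStep; simp [h]
      rw [hstep, bRuns_go rest (s+1) s s (by omega)]
      simp only [runsSpec, h, if_true, reduceIte]
      rcases hm : runsSpec (s+1) rest with _ | ⟨⟨s', e⟩, rs⟩
      · simp
      · by_cases hs : s' = s + 1 <;> simp [hs]
    · have hstep : bRunsStep [] (s, x) = [] := by unfold bRunsStep; simp [h]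
      rw [hstep, ih (s+1)]
      simp [runsSpec, h]

lemma foldl_bEmitRun (i : Int) (l : List (Int × Int)) :
    ∀ (d : PySem.Dict (Int × Int) Int),
      l.foldl (bEmitRun i) d =
        (l.flatMap (runE i)).foldl (fun d (p : (Int × Int) × Int) => d.insert p.1 p.2) d := by
  induction l with
  | nil => intro d; simp
  | cons r l ih =>
    intro d
    rw [List.foldl_cons, List.flatMap_cons, List.foldl_append, ih]
    congr 1
    rw [runE, List.foldl_map]
    rfl

lemma bRow_spec (i : Int) (row : List String) (d : PySem.Dict (Int × Int) Int)
    (h : ∀ j : Int, d.contains (i, j) = false) :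
    bRow d (i, row) =
      PySem.Dict.mk (d.items ++ Dr i ((row.length : Int) - 1) row.reverse 0) := by
  have hruns : bRuns row = runsSpec 0 row := bRuns_eq row 0
  have hflat : (bRuns row).reverse.flatMap (runE i) = Dr i ((row.length : Int) - 1) row.reverse 0 := by
    rw [hruns]
    have := emitB_eq_Dr row 0 i
    rw [emitB] at this
    rw [this]; norm_num
  rw [bRow]
  simp only []
  rw [foldl_bEmitRun, hflat]
  apply PySem.Dict.ext
  have h1 : ∀ a ∈ Dr i ((row.length : Int) - 1) row.reverse 0, d.contains a.1 = false := by
    intro a ha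
    have := (Dr_mem row.reverse i _ _ a ha).1
    have heta : a.1 = (i, a.1.2) := by rw [← this]
    rw [heta]; exact h a.1.2
  have hit : (List.foldl (fun (d : PySem.Dict (Int × Int) Int) (p : (Int × Int) × Int) => d.insert p.1 p.2) d
        (Dr i ((row.length : Int) - 1) row.reverse 0)).items
      = d.items ++ (Dr i ((row.length : Int) - 1) row.reverse 0).map (fun a => (a.1, a.2)) :=
    PySem.Dict.items_foldl_insert_fresh _ (fun (p : (Int × Int) × Int) => p.1)
      (fun (p : (Int × Int) × Int) => p.2) d h1 (Dr_keys_nodup row.reverse i _ _)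
  rw [hit]
  simp

lemma aInner_go (row : List String) (i : Int) :
    ∀ (k : Nat) (d : PySem.Dict (Int × Int) Int) (c : Int), k ≤ row.length →
      (∀ j : Int, j < (k : Int) → d.contains (i, j) = false) →
      (PySem.List.pyRange ((k : Int) - 1) (-1) (-1)).foldl
        (fun st j =>
          if PySem.List.pyGetD row j "" ≠ "1" then (st.1, 0)
          else (st.1.insert (i, j) (st.2 + 1), st.2 + 1)) (d, c)
        = (PySem.Dict.mk (d.items ++ Dr i ((k : Int) - 1) ((row.take k).reverse) c),
           Cr ((row.take k).reverse) c) := by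
  intro k
  induction k with
  | zero =>
    intro d c _ _
    rw [PySem.List.pyRange_neg_one_eq_nil (by omega)]
    simp [Dr, Cr]
  | succ k ih =>
    intro d c hk hfresh
    have hklen : k < row.length := by omega
    have hrange : PySem.List.pyRange (((k+1 : Nat) : Int) - 1) (-1) (-1) =
        (k : Int) :: PySem.List.pyRange ((k : Int) - 1) (-1) (-1) := by
      have : (((k+1 : Nat) : Int) - 1) = (k : Int) := by push_cast; ring
      rw [this, PySem.List.pyRange_neg_one_cons (by omega)]
    rw [hrange, List.foldl_cons]
    have hget : PySem.List.pyGetD row ((k : Nat) : Int) "" = row[k] := by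
      rw [PySem.List.pyGetD_natCast, List.getD_eq_getElem?_getD, List.getElem?_eq_getElem hklen,
        Option.getD_some]
    have htake : (row.take (k+1)).reverse = row[k] :: (row.take k).reverse := by
      rw [List.take_add_one, List.getElem?_eq_getElem hklen]
      simp
    have he : (((k+1:Nat):Int) - 1) = (k : Int) := by push_cast; ring
    by_cases h : row[k] = "1"
    · have hbody :
          (if PySem.List.pyGetD row ((k:Nat) : Int) "" ≠ "1" then
            ((d, c).1, (0:Int))
          else ((d, c).1.insert (i, ((k:Nat):Int)) ((d, c).2 + 1), (d, c).2 + 1))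
          = (d.insert (i, (k : Int)) (c + 1), c + 1) := by
        rw [hget, if_neg (by simp [h])]
      rw [hbody]
      have hfresh' : ∀ j : Int, j < (k : Int) →
          (d.insert (i, (k : Int)) (c + 1)).contains (i, j) = false := by
        intro j hj
        rw [PySem.Dict.contains_insert]
        have h1 : (((i, j) : Int × Int) == (i, (k : Int))) = false := by
          simp [Prod.ext_iff]; omega
        rw [h1, Bool.false_or]
        exact hfresh j (by omega)
      rw [ih (d.insert (i, (k : Int)) (c + 1)) (c + 1) (by omega) hfresh']
      have hins : (d.insert (i, (k : Int)) (c + 1)).items = d.items ++ [((i, (k:Int)), c + 1)] :=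
        PySem.Dict.items_insert_of_not_contains d _ (hfresh (k : Int) (by push_cast; omega))
      rw [hins, htake]
      have hDr : Dr i (((k+1:Nat):Int) - 1) (row[k] :: (row.take k).reverse) c
          = ((i, (k:Int)), c + 1) :: Dr i ((k:Int) - 1) ((row.take k).reverse) (c + 1) := by
        rw [he]
        simp only [Dr]
        rw [if_pos h]
      rw [hDr]
      have hCr : Cr (row[k] :: (row.take k).reverse) c
          = Cr ((row.take k).reverse) (c + 1) := by
        simp only [Cr]; rw [if_pos h]
      rw [hCr]
      simp
    · have hbody :
          (if PySem.List.pyGetD row ((k:Nat) : Int) "" ≠ "1" then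
            ((d, c).1, (0:Int))
          else ((d, c).1.insert (i, ((k:Nat):Int)) ((d, c).2 + 1), (d, c).2 + 1))
          = (d, 0) := by
        rw [hget, if_pos h]
      rw [hbody]
      rw [ih d 0 (by omega) (fun j hj => hfresh j (by omega))]
      rw [htake]
      have hDr : Dr i (((k+1:Nat):Int) - 1) (row[k] :: (row.take k).reverse) c
          = Dr i ((k:Int) - 1) ((row.take k).reverse) 0 := by
        rw [he]
        simp only [Dr]
        rw [if_neg h]
      have hCr : Cr (row[k] :: (row.take k).reverse) c
          = Cr ((row.take k).reverse) 0 := by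
        simp only [Cr]; rw [if_neg h]
      rw [hDr, hCr]

lemma aInner_spec (row : List String) (i : Int) (d : PySem.Dict (Int × Int) Int)
    (h : ∀ j : Int, d.contains (i, j) = false) :
    aInner i row (d, 0) =
      (PySem.Dict.mk (d.items ++ Dr i ((row.length : Int) - 1) row.reverse 0),
       Cr row.reverse 0) := by
  have := aInner_go row i row.length d 0 (le_refl _) (fun j _ => h j)
  rw [List.take_length] at this
  exact this

lemma aOuter (matrix : List (List String)) :
    ∀ (k i0 : Nat) (d : PySem.Dict (Int × Int) Int),
      i0 + k = matrix.length →
      (∀ p ∈ d.keys, p.1 < (i0 : Int)) →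
      (PySem.List.pyRange (i0 : Int) (matrix.length : Int) 1).foldl
        (fun (st : PySem.Dict (Int × Int) Int × Int) i =>
          ((aInner i (PySem.List.pyGetD matrix i []) st).1, 0)) (d, 0)
        = (PySem.Dict.mk (d.items ++ flatRows (matrix.drop i0) (i0 : Int)), 0) := by
  intro k
  induction k with
  | zero =>
    intro i0 d hlen hkeys
    rw [PySem.List.pyRange_one_eq_nil (by omega)]
    rw [List.drop_of_length_le (by omega)]
    simp [flatRows]
  | succ k ih =>
    intro i0 d hlen hkeys
    have hi0 : i0 < matrix.length := by omega
    rw [PySem.List.pyRange_one_cons (by push_cast; omega), List.foldl_cons]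
    have hget : PySem.List.pyGetD matrix ((i0 : Nat) : Int) [] = matrix[i0] := by
      rw [PySem.List.pyGetD_natCast]
      simp [List.getD, List.getElem?_eq_getElem hi0]
    have hfresh : ∀ j : Int, d.contains ((i0 : Int), j) = false := by
      intro j
      rw [← Bool.not_eq_true, PySem.Dict.contains_iff_mem_keys]
      intro hmem
      have := hkeys _ hmem
      simp at this
    have hbody :
        ((aInner ((i0:Nat) : Int) (PySem.List.pyGetD matrix ((i0:Nat) : Int) []) ((d, 0) : PySem.Dict (Int × Int) Int × Int)).1, (0:Int))
        = (PySem.Dict.mk (d.items ++ Dr (i0 : Int) ((matrix[i0].length : Int) - 1) matrix[i0].reverse 0), 0) := by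
      rw [hget, aInner_spec matrix[i0] (i0 : Int) d hfresh]
    rw [hbody]
    have hkeys' : ∀ p ∈ (PySem.Dict.mk (d.items ++ Dr (i0 : Int) ((matrix[i0].length : Int) - 1) matrix[i0].reverse 0)).keys,
        p.1 < ((i0 + 1 : Nat) : Int) := by
      intro p hp
      rw [PySem.Dict.keys_mk, List.map_append, List.mem_append] at hp
      rcases hp with hp | hp
      · have := hkeys p hp
        push_cast; omega
      · rcases List.mem_map.mp hp with ⟨q, hq, rfl⟩
        have := (Dr_mem matrix[i0].reverse (i0 : Int) _ _ q hq).1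
        rw [this]; push_cast; omega
    have hstep := ih (i0 + 1) _ (by omega) hkeys'
    have hcast : ((i0 : Nat) : Int) + 1 = ((i0 + 1 : Nat) : Int) := by push_cast; ring
    rw [hcast, hstep]
    have hdrop : matrix.drop i0 = matrix[i0] :: matrix.drop (i0 + 1) :=
      List.drop_eq_getElem_cons hi0
    rw [hdrop]
    have hflat : flatRows (matrix[i0] :: matrix.drop (i0+1)) (i0 : Int)
        = Dr (i0 : Int) ((matrix[i0].length : Int) - 1) matrix[i0].reverse 0
          ++ flatRows (matrix.drop (i0+1)) ((i0 : Int) + 1) := rfl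
    rw [hflat, List.append_assoc, hcast]

lemma bOuter (rows : List (List String)) :
    ∀ (i0 : Int) (d : PySem.Dict (Int × Int) Int),
      (∀ p ∈ d.keys, p.1 < i0) →
      (PySem.List.enumerate rows i0).foldl bRow d
        = PySem.Dict.mk (d.items ++ flatRows rows i0) := by
  induction rows with
  | nil =>
    intro i0 d _
    simp [PySem.List.enumerate_nil, flatRows]
  | cons row rows ih =>
    intro i0 d hkeys
    rw [PySem.List.enumerate_cons, List.foldl_cons]
    have hfresh : ∀ j : Int, d.contains (i0, j) = false := by
      intro j
      rw [← Bool.not_eq_true, PySem.Dict.contains_iff_mem_keys]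
      intro hmem
      have := hkeys _ hmem
      simp at this
    rw [bRow_spec i0 row d hfresh]
    have hkeys' : ∀ p ∈ (PySem.Dict.mk (d.items ++ Dr i0 ((row.length : Int) - 1) row.reverse 0)).keys,
        p.1 < i0 + 1 := by
      intro p hp
      rw [PySem.Dict.keys_mk, List.map_append, List.mem_append] at hp
      rcases hp with hp | hp
      · have := hkeys p hp; omega
      · rcases List.mem_map.mp hp with ⟨q, hq, rfl⟩
        have := (Dr_mem row.reverse i0 _ _ q hq).1
        omega
    rw [ih (i0 + 1) _ hkeys']
    simp [flatRows]

-- ===== VERDICT (by name: the statement is the Claim_ definition above) =====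
theorem make_right_one_memo_spec : Claim_equal_make_right_one_memo := by
  intro matrix _
  unfold Spec_make_right_one_memo
  unfold make_right_one_memo make_right_one_memo_alt
  have hA := aOuter matrix matrix.length 0 PySem.Dict.empty (by omega) (by intro p hp; simp [PySem.Dict.empty] at hp)
  have hB := bOuter matrix 0 PySem.Dict.empty (by intro p hp; simp [PySem.Dict.empty] at hp)
  simp only [Nat.cast_zero] at hA
  rw [hA, List.drop_zero] at *
  rw [hB]
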